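-- pv_equiv track=rewrite | github.com/pypi-data/pypi-mirror-382 | packages/colcon-runner/colcon_runner-0.3.0.tar.gz/colcon_runner-0.3.0/colcon_runner/colcon_runner.py | _parse_verbs
-- ===== SOURCE A (Python) =====
-- class ParseError(Exception):
--     pass
--
-- def _parse_verbs(cmds: str):
--     """Parse a string like 'boto' into [(verb, spec), ...]."""
--     result = []
--     i = 0
--     while i < len(cmds):
--         if cmds[i] in ("s", "b", "t", "c"):
--             verb = cmds[i]
--             if verb == "s":
--                 result.append((verb, None))
--                 i += 1
--                 continue
--             # If no specifier provided or invalid specifier, default to "a"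
--             if i + 1 >= len(cmds) or cmds[i + 1] not in ("o", "u", "a"):
--                 result.append((verb, "a"))
--                 i += 1
--             else:
--                 result.append((verb, cmds[i + 1]))
--                 i += 2
--         else:
--             raise ParseError(f"unknown command letter '{cmds[i]}'")
--     return result
-- ===== SOURCE B (Python) =====
-- class ParseError(Exception):
--     pass
--
-- def _parse_verbs(cmds: str):
--     """Parse a string like 'boto' into [(verb, spec), ...] via a one-char-at-a-time state machine."""
--     result = []
--     pending = None  # a verb in {'b','t','c'} waiting for its specifier
--     for ch in cmds:
--         if pending is not None:
--             if ch in ("o", "u", "a"):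
--                 result.append((pending, ch))
--                 pending = None
--                 continue
--             result.append((pending, "a"))
--             pending = None
--         if ch == "s":
--             result.append((ch, None))
--         elif ch in ("b", "t", "c"):
--             pending = ch
--         else:
--             raise ParseError(f"unknown command letter '{ch}'")
--     if pending is not None:
--         result.append((pending, "a"))
--     return result
-- ===== Notes on version B (the rewrite author's own statement) =====
-- stated objective: alternative
-- what changed: Replaced A's index-based loop with two-character lookahead by a single forward pass over the characters that carries a pending verb as state and flushes it with the default specifier when the next character is not a specifier or the input ends.
import Mathlib
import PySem

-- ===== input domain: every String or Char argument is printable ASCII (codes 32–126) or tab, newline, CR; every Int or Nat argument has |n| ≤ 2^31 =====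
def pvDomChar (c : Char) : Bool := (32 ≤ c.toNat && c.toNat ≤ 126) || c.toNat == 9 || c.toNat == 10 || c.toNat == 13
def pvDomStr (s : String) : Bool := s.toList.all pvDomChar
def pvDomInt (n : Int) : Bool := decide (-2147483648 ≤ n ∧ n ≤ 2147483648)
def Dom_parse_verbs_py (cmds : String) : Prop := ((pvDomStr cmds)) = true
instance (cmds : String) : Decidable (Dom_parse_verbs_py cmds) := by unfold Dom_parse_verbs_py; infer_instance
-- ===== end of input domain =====

-- B replaces A's index-based two-character-lookahead loop by a one-pass state machine
-- carrying a pending verb (objective: alternative decomposition, same O(n) cost).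
-- Where Python A raises ParseError the loops below return none and the wrappers fall
-- back to []; Pre_ excludes exactly those inputs.

-- ===== PORT A =====
-- A's while loop over the index i; `none` = ParseError.
def parseA_loop (cs : List Char) (i : Nat) (result : List (String × Option String)) :
    Option (List (String × Option String)) :=
  if h : i < cs.length then
    let c := cs[i]
    if c = 's' ∨ c = 'b' ∨ c = 't' ∨ c = 'c' then
      if c = 's' then
        parseA_loop cs (i + 1) (result ++ [(String.mk [c], none)])
      else if cs.length ≤ i + 1 ∨
          ¬ (cs.getD (i + 1) ' ' = 'o' ∨ cs.getD (i + 1) ' ' = 'u' ∨ cs.getD (i + 1) ' ' = 'a') then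
        parseA_loop cs (i + 1) (result ++ [(String.mk [c], some "a")])
      else
        parseA_loop cs (i + 2) (result ++ [(String.mk [c], some (String.mk [cs.getD (i + 1) ' ']))])
    else none
  else some result
termination_by cs.length - i

def parse_verbs_py (cmds : String) : List (String × Option String) :=
  (parseA_loop cmds.toList 0 []).getD []

-- ===== PORT B =====
-- B's for-loop over the characters, with the pending verb as extra state; `none` = ParseError.
-- A flushed pending verb falls through to the classification of the same character,
-- exactly as Source B's loop body does.
def parseB_loop : List Char → Option Char → List (String × Option String) →
    Option (List (String × Option String))
  | [], some v, result => some (result ++ [(String.mk [v], some "a")])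
  | [], none, result => some result
  | ch :: rest, some v, result =>
      if ch = 'o' ∨ ch = 'u' ∨ ch = 'a' then
        parseB_loop rest none (result ++ [(String.mk [v], some (String.mk [ch]))])
      else
        parseB_loop (ch :: rest) none (result ++ [(String.mk [v], some "a")])
  | ch :: rest, none, result =>
      if ch = 's' then
        parseB_loop rest none (result ++ [(String.mk [ch], none)])
      else if ch = 'b' ∨ ch = 't' ∨ ch = 'c' then
        parseB_loop rest (some ch) result
      else none
termination_by cs pending _ => (cs.length, match pending with | some _ => 1 | none => 0)

def parse_verbs_py_alt (cmds : String) : List (String × Option String) :=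
  (parseB_loop cmds.toList none []).getD []

-- ===== PRECONDITION & SPEC =====
-- Grammar membership (s | [btc][oua]?)* — exactly the inputs on which Python A returns
-- without raising ParseError.
def pvOK : List Char → Bool
  | [] => true
  | [c] => (c = 's' || c = 'b' || c = 't' || c = 'c')
  | c :: d :: rest =>
    if c = 's' then pvOK (d :: rest)
    else if c = 'b' ∨ c = 't' ∨ c = 'c' then
      (if d = 'o' ∨ d = 'u' ∨ d = 'a' then pvOK rest else pvOK (d :: rest))
    else false

def Pre_parse_verbs_py (cmds : String) : Prop := pvOK cmds.toList = true
instance (cmds : String) : Decidable (Pre_parse_verbs_py cmds) := by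
  unfold Pre_parse_verbs_py; infer_instance

def pvWitness_parse_verbs_py : String := "sbota"

def Spec_parse_verbs_py (cmds : String) (out : List (String × Option String)) : Prop :=
  out = parse_verbs_py_alt cmds
instance (cmds : String) (out : List (String × Option String)) :
    Decidable (Spec_parse_verbs_py cmds out) := by unfold Spec_parse_verbs_py; infer_instance

-- ===== CLAIM (what is proved, stated in full; the proofs are below) =====
def Claim_equal_parse_verbs_py : Prop :=
  ∀ (cmds : String), Dom_parse_verbs_py cmds → Pre_parse_verbs_py cmds →
    Spec_parse_verbs_py cmds (parse_verbs_py cmds)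

-- ===== LEMMAS AND PROOFS =====

-- The two loops return the same Option on every input (raising inputs included):
-- A's lookahead step corresponds to one or two steps of B's state machine.
theorem loops_eq (n : Nat) : ∀ (cs : List Char) (i : Nat) (result : List (String × Option String)),
    cs.length - i ≤ n → parseA_loop cs i result = parseB_loop (cs.drop i) none result := by
  induction n with
  | zero =>
    intro cs i result h
    have hi : cs.length ≤ i := by omega
    rw [parseA_loop]
    simp [List.drop_eq_nil_of_le hi, Nat.not_lt_of_le hi, parseB_loop]
  | succ n ih =>
    intro cs i result h
    by_cases hi : i < cs.length
    · have hdrop : cs.drop i = cs[i] :: cs.drop (i + 1) := List.drop_eq_getElem_cons hi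
      rw [parseA_loop]
      simp only [hi, dif_pos]
      by_cases hs : cs[i] = 's'
      · rw [if_pos (Or.inl hs), if_pos hs, hdrop, parseB_loop, if_pos hs]
        exact ih cs (i + 1) _ (by omega)
      · by_cases hv : cs[i] = 'b' ∨ cs[i] = 't' ∨ cs[i] = 'c'
        · rw [if_pos (by tauto), if_neg hs, hdrop]
          conv_rhs => rw [parseB_loop]
          rw [if_neg hs, if_pos hv]
          by_cases h1 : i + 1 < cs.length
          · have hdrop1 : cs.drop (i + 1) = cs[i + 1] :: cs.drop (i + 2) :=
              List.drop_eq_getElem_cons h1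
            have hgetD : cs.getD (i + 1) ' ' = cs[i + 1] := List.getD_eq_getElem cs ' ' h1
            by_cases hspec : cs[i + 1] = 'o' ∨ cs[i + 1] = 'u' ∨ cs[i + 1] = 'a'
            · rw [if_neg (by push_neg; exact ⟨h1, by rw [hgetD]; exact hspec⟩)]
              rw [hdrop1]
              conv_rhs => rw [parseB_loop]
              rw [if_pos hspec, hgetD]
              exact ih cs (i + 2) _ (by omega)
            · rw [if_pos (Or.inr (by rw [hgetD]; exact hspec))]
              rw [hdrop1]
              conv_rhs => rw [parseB_loop]
              rw [if_neg hspec, ← hdrop1]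
              exact ih cs (i + 1) _ (by omega)
          · have hd1 : cs.drop (i + 1) = [] := List.drop_eq_nil_of_le (by omega)
            rw [if_pos (Or.inl (by omega))]
            rw [ih cs (i + 1) _ (by omega), hd1]
            rw [parseB_loop, parseB_loop]
        · rw [if_neg (by tauto), hdrop, parseB_loop, if_neg hs, if_neg hv]
    · have hle : cs.length ≤ i := by omega
      rw [parseA_loop]
      simp [List.drop_eq_nil_of_le hle, Nat.not_lt_of_le hle, parseB_loop]

-- ===== VERDICT (by name: the statement is the Claim_ definition above) =====
theorem parse_verbs_py_spec : Claim_equal_parse_verbs_py := by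
  intro cmds _ _
  unfold Spec_parse_verbs_py parse_verbs_py parse_verbs_py_alt
  rw [loops_eq cmds.toList.length cmds.toList 0 [] (by omega), List.drop_zero]
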